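-- pv_equiv track=rewrite | github.com/Nyesteban/Public-Key-Cryptography | Lab4/main.py | computeSplitValues
-- ===== SOURCE A (Python) =====
-- def ConvertCharToNumber(ch, charTable):
--     # Given a character, find it in the charTable and return its index
--     ch_pos = charTable.index(ch)
--     return ch_pos
--
-- def computeSplitValues(splitMsg, charTable, l):
--     # Compute the numeric value of each block using the character table
--     # Returns a list of values, where value at position 0 is the value of the first block, etc.
--
--     splitValues = []
--     i = 0
--     while i < len(splitMsg):
--         pair = splitMsg[i]
--
--         pair_value = 0
--         maxL = l - 1
--         for j in range(len(pair)):
--             pair_value += ConvertCharToNumber(pair[j], charTable) * pow(27, maxL)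
--             maxL -= 1
--         splitValues.append(pair_value)
--         i += 1
--     return splitValues
-- ===== SOURCE B (Python) =====
-- def computeSplitValues(splitMsg, charTable, l):
--     # Horner's method per block, then realign by the remaining power of 27.
--     def blockValue(pair):
--         v = 0
--         for ch in pair:
--             v = v * 27 + charTable.index(ch)
--         return v * pow(27, l - len(pair))
--     return [blockValue(pair) for pair in splitMsg]
-- ===== Notes on version B (the rewrite author's own statement) =====
-- stated objective: idiomatic
-- what changed: Each block is evaluated with Horner's method (value = value*27 + index, then one multiplication by 27^(l-len(pair))) inside a list comprehension, instead of summing explicit 27^maxL terms with a decrementing exponent counter in a while loop.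
-- outside the precondition, e.g. on computeSplitValues(['x_x'], 'b_x', 2): A returns [55.074074074074076], B returns [55.07407407407407]; on computeSplitValues(['ab'], 'ab', 1): A returns [0.037037037037037035], B returns [0.037037037037037035]
import Mathlib
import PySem

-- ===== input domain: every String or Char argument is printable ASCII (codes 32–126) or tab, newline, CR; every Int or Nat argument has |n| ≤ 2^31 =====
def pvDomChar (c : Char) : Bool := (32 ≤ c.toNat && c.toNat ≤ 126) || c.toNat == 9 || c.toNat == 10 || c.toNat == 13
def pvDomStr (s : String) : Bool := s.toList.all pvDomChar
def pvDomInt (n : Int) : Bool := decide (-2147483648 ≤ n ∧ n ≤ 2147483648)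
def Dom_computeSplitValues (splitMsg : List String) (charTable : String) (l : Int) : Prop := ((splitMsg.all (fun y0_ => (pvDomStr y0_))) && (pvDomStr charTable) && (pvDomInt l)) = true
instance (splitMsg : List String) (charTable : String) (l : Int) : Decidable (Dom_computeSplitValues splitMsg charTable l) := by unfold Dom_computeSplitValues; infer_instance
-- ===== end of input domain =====

-- B evaluates each block with Horner's method instead of summing explicit powers of 27 (objective: idiomatic).

-- ===== PORT A =====
-- charTable.index(ch); Pre_ guarantees ch ∈ charTable, so the getD 0 default is never used
def convertCharToNumber (ch : Char) (charTable : String) : Int :=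
  ((PySem.List.index? charTable.toList ch).getD 0 : Nat)

-- inner for-loop state is (pair_value, maxL); pow(27, maxL) with maxL ≥ 0 under Pre_
def computeSplitValues (splitMsg : List String) (charTable : String) (l : Int) : List Int :=
  splitMsg.foldl
    (fun acc pair =>
      let st := pair.toList.foldl
        (fun (st : Int × Int) ch =>
          (st.1 + convertCharToNumber ch charTable * 27 ^ st.2.toNat, st.2 - 1))
        (0, l - 1)
      acc ++ [st.1])
    []

-- ===== PORT B =====
def computeSplitValues_alt (splitMsg : List String) (charTable : String) (l : Int) : List Int :=
  splitMsg.map (fun pair =>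
    (pair.toList.foldl
      (fun v ch => v * 27 + ((PySem.List.index? charTable.toList ch).getD 0 : Nat)) 0)
      * 27 ^ (l - (pair.toList.length : Int)).toNat)

-- ===== PRECONDITION & SPEC =====
-- Pre_ excludes inputs where A raises ValueError (a block character absent from charTable) and
-- inputs where some block is longer than l, on which pow gets a negative exponent and A returns
-- a list containing a float, not a value of the declared List Int type.
def Pre_computeSplitValues (splitMsg : List String) (charTable : String) (l : Int) : Prop :=
  (splitMsg.all (fun pair =>
    decide ((pair.toList.length : Int) ≤ l) && pair.toList.all (fun ch => charTable.toList.contains ch))) = true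
instance (splitMsg : List String) (charTable : String) (l : Int) : Decidable (Pre_computeSplitValues splitMsg charTable l) := by unfold Pre_computeSplitValues; infer_instance

def pvWitness_computeSplitValues : List String × String × Int := (["a"], "ab", 1)

def Spec_computeSplitValues (splitMsg : List String) (charTable : String) (l : Int) (out : List Int) : Prop := out = computeSplitValues_alt splitMsg charTable l
instance (splitMsg : List String) (charTable : String) (l : Int) (out : List Int) : Decidable (Spec_computeSplitValues splitMsg charTable l out) := by unfold Spec_computeSplitValues; infer_instance

-- ===== CLAIM (what is proved, stated in full; the proofs are below) =====
def Claim_equal_computeSplitValues : Prop := ∀ (splitMsg : List String) (charTable : String) (l : Int), Dom_computeSplitValues splitMsg charTable l → Pre_computeSplitValues splitMsg charTable l → Spec_computeSplitValues splitMsg charTable l (computeSplitValues splitMsg charTable l)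

-- ===== LEMMAS AND PROOFS =====

-- folding a Horner step from seed v shifts the result by v * 27^len
theorem hornerShift (f : Char → Int) (cs : List Char) (v : Int) :
    cs.foldl (fun v ch => v * 27 + f ch) v
      = v * 27 ^ cs.length + cs.foldl (fun v ch => v * 27 + f ch) 0 := by
  induction cs generalizing v with
  | nil => simp
  | cons c cs ih =>
    simp only [List.foldl_cons, List.length_cons]
    rw [ih (v * 27 + f c), ih (0 * 27 + f c)]
    ring

-- A's inner sum-of-powers loop equals Horner's value times the leftover power
theorem blockEq (f : Char → Int) (cs : List Char) (v m : Int)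
    (h : (cs.length : Int) ≤ m + 1) :
    (cs.foldl (fun (st : Int × Int) ch => (st.1 + f ch * 27 ^ st.2.toNat, st.2 - 1)) (v, m)).1
      = v + (cs.foldl (fun v ch => v * 27 + f ch) 0) * 27 ^ (m + 1 - (cs.length : Int)).toNat := by
  induction cs generalizing v m with
  | nil => simp
  | cons c cs ih =>
    simp only [List.foldl_cons, List.length_cons]
    have h' : (cs.length : Int) ≤ m := by
      simp only [List.length_cons] at h; push_cast at h; omega
    have hlen : (cs.length : Int) ≤ (m - 1) + 1 := by omega
    rw [ih (v + f c * 27 ^ m.toNat) (m - 1) hlen, hornerShift f cs (0 * 27 + f c)]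
    have hm : m.toNat = cs.length + (m - (cs.length : Int)).toNat := by omega
    have he : (m - 1 + 1 - (cs.length : Int)).toNat = (m - (cs.length : Int)).toNat := by omega
    rw [he]
    push_cast
    have he2 : (m + 1 - ((cs.length : Int) + 1)).toNat = (m - (cs.length : Int)).toNat := by omega
    rw [he2, hm, pow_add]
    ring

theorem foldlAppendMap (g : String → Int) (xs : List String) (acc : List Int) :
    xs.foldl (fun acc x => acc ++ [g x]) acc = acc ++ xs.map g := by
  induction xs generalizing acc with
  | nil => simp
  | cons x xs ih => simp [List.foldl_cons, ih]

-- ===== VERDICT (by name: the statement is the Claim_ definition above) =====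
theorem computeSplitValues_spec : Claim_equal_computeSplitValues := by
  intro splitMsg charTable l _ hpre
  unfold Spec_computeSplitValues computeSplitValues computeSplitValues_alt
  rw [foldlAppendMap]
  simp only [List.nil_append]
  apply List.map_congr_left
  intro pair hmem
  have hlen : (pair.toList.length : Int) ≤ l := by
    unfold Pre_computeSplitValues at hpre
    rw [List.all_eq_true] at hpre
    have := hpre pair hmem
    simp only [Bool.and_eq_true, decide_eq_true_eq] at this
    exact this.1
  have := blockEq (fun ch => convertCharToNumber ch charTable) pair.toList 0 (l - 1)
    (by omega)
  simp only [convertCharToNumber] at this ⊢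
  rw [this]
  have : (l - 1 + 1 - (pair.toList.length : Int)) = l - (pair.toList.length : Int) := by ring
  rw [this]
  ring
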